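-- pv_equiv track=rewrite | github.com/solonsrs94-blip/financial-workbench | lib/data/providers/edgar_quarterly.py | _dedup_annual_entries
-- ===== SOURCE A (Python) =====
-- from collections import defaultdict
--
-- def _dedup_annual_entries(entries: list) -> list:
--     """Deduplicate annual entries by end date, keep latest filing."""
--     by_end: dict = defaultdict(list)
--     for f in entries:
--         by_end[f["end"]].append(f)
--     return [
--         max(v, key=lambda x: x.get("filed", ""))
--         for v in by_end.values()
--     ]
-- ===== SOURCE B (Python) =====
-- def _dedup_annual_entries(entries: list) -> list:
--     """Deduplicate annual entries by end date, keep latest filing (single pass)."""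
--     best: dict = {}
--     for f in entries:
--         e = f["end"]
--         g = best.get(e)
--         if g is None or f.get("filed", "") > g.get("filed", ""):
--             best[e] = f
--     return list(best.values())
-- ===== Notes on version B (the rewrite author's own statement) =====
-- stated objective: simpler
-- what changed: B fuses A's two passes (group all entries by end date with a defaultdict of lists, then take the max of each group) into a single pass that keeps only the best entry seen so far per end date, so no intermediate groups are built.
import Mathlib
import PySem

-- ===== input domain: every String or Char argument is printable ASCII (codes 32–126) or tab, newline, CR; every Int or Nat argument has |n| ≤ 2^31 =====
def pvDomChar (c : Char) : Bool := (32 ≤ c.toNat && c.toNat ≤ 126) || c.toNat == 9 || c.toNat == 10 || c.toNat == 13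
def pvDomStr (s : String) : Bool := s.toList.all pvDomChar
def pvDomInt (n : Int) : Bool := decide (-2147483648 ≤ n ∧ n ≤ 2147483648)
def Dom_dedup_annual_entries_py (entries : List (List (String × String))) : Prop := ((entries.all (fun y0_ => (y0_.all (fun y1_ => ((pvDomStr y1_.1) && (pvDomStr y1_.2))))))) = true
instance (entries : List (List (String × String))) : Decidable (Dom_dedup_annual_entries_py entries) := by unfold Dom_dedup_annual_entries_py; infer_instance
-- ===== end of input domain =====

-- B fuses A's two passes (group by end date, then take max per group) into one pass
-- keeping only the best entry per end date; objective: simpler (no measured speed claim).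

-- f["end"] / f.get("filed", "") : each Python dict parameter is the PySem.Dict of its
-- association list (duplicate keys: last value wins, as in Python's dict(...) construction).
def pvEnd (f : List (String × String)) : String :=
  ((PySem.Dict.ofList f).get? "end").getD ""
def pvFiled (f : List (String × String)) : String :=
  ((PySem.Dict.ofList f).get? "filed").getD ""

-- ===== PORT A =====
-- loop body: by_end[f["end"]].append(f)   (defaultdict(list))
def pvAStep (d : PySem.Dict String (List (List (String × String))))
    (f : List (String × String)) : PySem.Dict String (List (List (String × String))) :=
  d.modify (pvEnd f) [] (fun v => v ++ [f])

def dedup_annual_entries_py (entries : List (List (String × String))) : List (List (String × String)) :=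
  let by_end := entries.foldl pvAStep PySem.Dict.empty
  -- max(v, key=lambda x: x.get("filed", "")); every group is nonempty so the .getD [] never fires
  by_end.values.map (fun v => (PySem.List.max? v pvFiled).getD [])

-- ===== PORT B =====
-- loop body: keep f iff its end date is new or its "filed" is strictly later than the stored one
def pvBStep (best : PySem.Dict String (List (String × String)))
    (f : List (String × String)) : PySem.Dict String (List (String × String)) :=
  match best.get? (pvEnd f) with
  | none => best.insert (pvEnd f) f
  | some g => if pvFiled g < pvFiled f then best.insert (pvEnd f) f else best

def dedup_annual_entries_py_alt (entries : List (List (String × String))) : List (List (String × String)) :=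
  (entries.foldl pvBStep PySem.Dict.empty).values

-- ===== PRECONDITION & SPEC =====
-- Pre_ excludes exactly the inputs where Python A raises KeyError: an entry without an "end" key.
def Pre_dedup_annual_entries_py (entries : List (List (String × String))) : Prop :=
  (entries.all (fun f => f.any (fun p => p.1 == "end"))) = true
instance (entries : List (List (String × String))) : Decidable (Pre_dedup_annual_entries_py entries) := by unfold Pre_dedup_annual_entries_py; infer_instance

def pvWitness_dedup_annual_entries_py : (List (List (String × String))) :=
  [[("end", "2020-12-31"), ("filed", "2021-02-01")]]

def Spec_dedup_annual_entries_py (entries : List (List (String × String))) (out : List (List (String × String))) : Prop := out = dedup_annual_entries_py_alt entries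
instance (entries : List (List (String × String))) (out : List (List (String × String))) : Decidable (Spec_dedup_annual_entries_py entries out) := by unfold Spec_dedup_annual_entries_py; infer_instance

-- ===== CLAIM (what is proved, stated in full; the proofs are below) =====
def Claim_equal_dedup_annual_entries_py : Prop := ∀ (entries : List (List (String × String))), Dom_dedup_annual_entries_py entries → Pre_dedup_annual_entries_py entries → Spec_dedup_annual_entries_py entries (dedup_annual_entries_py entries)

-- ===== LEMMAS AND PROOFS =====

-- image of one grouped entry under "take the first maximum of the group"
def pvF (p : String × List (List (String × String))) : String × List (String × String) :=
  (p.1, (PySem.List.max? p.2 pvFiled).getD [])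

-- invariant tying A's dict of groups to B's dict of best entries
def pvInv (d : PySem.Dict String (List (List (String × String))))
    (b : PySem.Dict String (List (String × String))) : Prop :=
  b.items = d.items.map pvF ∧ (∀ p ∈ d.items, p.2 ≠ []) ∧ (d.items.map Prod.fst).Nodup

lemma pvGetB (d : PySem.Dict String (List (List (String × String))))
    (b : PySem.Dict String (List (String × String))) (h : b.items = d.items.map pvF)
    (k : String) :
    b.get? k = (d.get? k).map (fun v => (PySem.List.max? v pvFiled).getD []) := by
  simp [PySem.Dict.get?, h, List.find?_map]
  have : ((fun p => p.1 == k) ∘ pvF) = (fun (p : String × List (List (String × String))) => p.1 == k) := by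
    funext p; simp [pvF]
  rw [this]
  cases d.items.find? (fun p => p.1 == k) <;> simp [pvF]

lemma pvMaxAppend (v : List (List (String × String))) (m f : List (String × String))
    (h : PySem.List.max? v pvFiled = some m) :
    PySem.List.max? (v ++ [f]) pvFiled =
      some (if pvFiled m < pvFiled f then f else m) := by
  simp only [PySem.List.max?] at h ⊢
  rw [List.foldl_append, h]
  by_cases hc : pvFiled m < pvFiled f <;> simp [List.foldl, hc]

lemma pvContainsIsSome {ν : Type} (d : PySem.Dict String ν) (k : String) :
    d.contains k = (d.get? k).isSome := by
  simp only [PySem.Dict.contains, PySem.Dict.get?, Option.isSome_map]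
  cases hf : List.find? (fun p => p.1 == k) d.items with
  | none =>
    rw [List.find?_eq_none] at hf
    simp only [Option.isSome_none]
    simp [List.any_eq_false]
    intro a w hp
    simpa using hf (a, w) hp
  | some q =>
    have hmem := List.mem_of_find?_eq_some hf
    have hq1 : q.1 = k := by simpa using List.find?_some hf
    simp only [Option.isSome_some]
    simp [List.any_eq_true]
    exact ⟨q.2, by rw [← hq1]; simpa using hmem⟩

lemma pvNotMemKeys {ν : Type} (d : PySem.Dict String ν) (k : String)
    (hc : d.contains k = false) : k ∉ d.items.map Prod.fst := by
  simp [PySem.Dict.contains, List.any_eq_false] at hc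
  intro hk
  obtain ⟨⟨a, w⟩, hp, h1⟩ := List.mem_map.mp hk
  exact absurd h1 (hc a w hp)

lemma pvGetUnique {ν : Type} (d : PySem.Dict String ν) (k : String) (v : ν)
    (hnd : (d.items.map Prod.fst).Nodup) (hdk : d.get? k = some v) :
    ∀ p ∈ d.items, p.1 = k → p.2 = v := by
  intro p hp hpk
  simp only [PySem.Dict.get?, Option.map_eq_some_iff] at hdk
  obtain ⟨q, hfind, hq2⟩ := hdk
  have hmem := List.mem_of_find?_eq_some hfind
  have hkk : q.1 = k := by
    have := List.find?_some hfind
    simpa using this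
  have hpq := List.inj_on_of_nodup_map hnd hp hmem (by simp [hpk, hkk])
  rw [hpq, hq2]

lemma pvInvStep (d : PySem.Dict String (List (List (String × String))))
    (b : PySem.Dict String (List (String × String))) (f : List (String × String))
    (h : pvInv d b) : pvInv (pvAStep d f) (pvBStep b f) := by
  obtain ⟨hit, hne, hnd⟩ := h
  have hget := pvGetB d b hit (pvEnd f)
  unfold pvAStep pvBStep
  cases hdk : d.get? (pvEnd f) with
  | none =>
    have hconA : d.contains (pvEnd f) = false := by rw [pvContainsIsSome, hdk]; rfl
    have hconB : b.contains (pvEnd f) = false := by rw [pvContainsIsSome, hget, hdk]; rfl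
    rw [hget, hdk]
    simp only [PySem.Dict.modify, PySem.Dict.getD, hdk, Option.getD_none,
      PySem.Dict.insert, hconA, hconB, Bool.false_eq_true, reduceIte]
    refine ⟨?_, ?_, ?_⟩
    · simp [hit, pvF, PySem.List.max?]
    · intro p hp
      rcases List.mem_append.mp hp with hp | hp
      · exact hne p hp
      · simp at hp; simp [hp]
    · have hk := pvNotMemKeys d (pvEnd f) hconA
      simp only [List.map_append]
      simp [List.nodup_append, hnd]
      intro a x hp h1
      exact hk (List.mem_map.mpr ⟨(a, x), hp, h1⟩)
  | some v =>
    have hconA : d.contains (pvEnd f) = true := by rw [pvContainsIsSome, hdk]; rfl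
    have hconB : b.contains (pvEnd f) = true := by rw [pvContainsIsSome, hget, hdk]; rfl
    have hv : v ≠ [] := by
      simp only [PySem.Dict.get?, Option.map_eq_some_iff] at hdk
      obtain ⟨q, hfind, hq2⟩ := hdk
      rw [← hq2]
      intro hq
      exact hne q (List.mem_of_find?_eq_some hfind) hq
    obtain ⟨m, hm⟩ : ∃ m, PySem.List.max? v pvFiled = some m := by
      cases hx : PySem.List.max? v pvFiled with
      | none => exact absurd ((PySem.List.max?_eq_none_iff v pvFiled).mp hx) hv
      | some m => exact ⟨m, rfl⟩
    have huniq := pvGetUnique d (pvEnd f) v hnd hdk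
    have hmax := pvMaxAppend v m f hm
    rw [hget, hdk]
    simp only [Option.map_some, hm, Option.getD_some]
    simp only [PySem.Dict.modify, PySem.Dict.getD, hdk, Option.getD_some,
      PySem.Dict.insert, hconA, if_pos, hconB]
    have hkeys : (List.map (fun p => if (p.1 == pvEnd f) = true then (pvEnd f, v ++ [f]) else p)
        d.items).map Prod.fst = d.items.map Prod.fst := by
      rw [List.map_map]
      apply List.map_congr_left
      intro p hp
      by_cases hpk : p.1 = pvEnd f <;> simp [hpk]
    have hitems :
        (List.map (fun p => if (p.1 == pvEnd f) = true then (pvEnd f, v ++ [f]) else p) d.items).map pvF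
        = d.items.map (fun p => if (p.1 == pvEnd f) = true
            then (pvEnd f, (PySem.List.max? (v ++ [f]) pvFiled).getD []) else pvF p) := by
      rw [List.map_map]
      apply List.map_congr_left
      intro p hp
      by_cases hpk : p.1 = pvEnd f <;> simp [hpk, pvF]
    by_cases hc : pvFiled m < pvFiled f
    · simp only [hc, if_pos]
      refine ⟨?_, ?_, ?_⟩
      · rw [hitems, hit, List.map_map]
        apply List.map_congr_left
        intro p hp
        by_cases hpk : p.1 = pvEnd f <;> simp [hpk, pvF, hmax, hc]
      · intro p hp
        simp only [List.mem_map] at hp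
        obtain ⟨q, hq, rfl⟩ := hp
        by_cases hpk : q.1 = pvEnd f <;> simp [hpk]
        exact hne q hq
      · rw [hkeys]; exact hnd
    · simp only [hc, reduceIte]
      refine ⟨?_, ?_, ?_⟩
      · rw [hitems, hit]
        apply List.map_congr_left
        intro p hp
        by_cases hpk : p.1 = pvEnd f
        · have hp2 : p.2 = v := huniq p hp hpk
          simp [hpk, pvF, hmax, hc, hp2, hm]
        · simp [hpk]
      · intro p hp
        simp only [List.mem_map] at hp
        obtain ⟨q, hq, rfl⟩ := hp
        by_cases hpk : q.1 = pvEnd f <;> simp [hpk]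
        exact hne q hq
      · rw [hkeys]; exact hnd

lemma pvInvFold (entries : List (List (String × String)))
    (d : PySem.Dict String (List (List (String × String))))
    (b : PySem.Dict String (List (String × String))) (h : pvInv d b) :
    pvInv (entries.foldl pvAStep d) (entries.foldl pvBStep b) := by
  induction entries generalizing d b with
  | nil => exact h
  | cons f t ih => exact ih _ _ (pvInvStep d b f h)

-- ===== VERDICT (by name: the statement is the Claim_ definition above) =====
theorem dedup_annual_entries_py_spec : Claim_equal_dedup_annual_entries_py := by
  intro entries _ _
  unfold Spec_dedup_annual_entries_py dedup_annual_entries_py dedup_annual_entries_py_alt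
  have h := pvInvFold entries PySem.Dict.empty PySem.Dict.empty
    ⟨by simp [PySem.Dict.empty], by simp [PySem.Dict.empty], by simp [PySem.Dict.empty]⟩
  obtain ⟨hitems, -, -⟩ := h
  simp [PySem.Dict.values, hitems, pvF, Function.comp]
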